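-- pv_equiv track=rewrite | github.com/ak-guy/DSA | Misc/11_partition_array_such_that_maximum_difference_is_k.py | partitionArray
-- ===== SOURCE A (Python) =====
-- from typing import List
--
-- def partitionArray(nums: List[int], k: int) -> int:
--     nums.sort() # O(NlogN)
--     res = 1
--     l, r = 0, 0
--     for i in range(len(nums)):
--         if nums[r] - nums[l] <= k:
--             r += 1
--         else:
--             l = i
--             r = i+1
--             res += 1
--     return res
-- ===== SOURCE B (Python) =====
-- from bisect import bisect_right
-- from typing import List
--
-- def partitionArray(nums: List[int], k: int) -> int:
--     # Sorts nums in place (same observable mutation as A), then jumps from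
--     # group boundary to group boundary with binary search.
--     nums.sort()
--     n = len(nums)
--     res = 0
--     i = 0
--     while i < n:
--         res += 1
--         i = max(i + 1, bisect_right(nums, nums[i] + k))
--     return res
-- ===== Notes on version B (the rewrite author's own statement) =====
-- stated objective: alternative
-- what changed: After sorting, A scans every element with a (res,l,r) greedy state; B jumps directly from group boundary to group boundary with bisect_right, visiting only the group starts.
-- intended difference: On the empty list A returns 1 (its res=1 initialisation) while B returns 0; 0 partitions is the intended count for an empty array. — e.g. on partitionArray([], 0): A returns 1, B returns 0
-- outside the precondition, e.g. on partitionArray([3, 1], -1): A returns 3, B returns 2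
import Mathlib
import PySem

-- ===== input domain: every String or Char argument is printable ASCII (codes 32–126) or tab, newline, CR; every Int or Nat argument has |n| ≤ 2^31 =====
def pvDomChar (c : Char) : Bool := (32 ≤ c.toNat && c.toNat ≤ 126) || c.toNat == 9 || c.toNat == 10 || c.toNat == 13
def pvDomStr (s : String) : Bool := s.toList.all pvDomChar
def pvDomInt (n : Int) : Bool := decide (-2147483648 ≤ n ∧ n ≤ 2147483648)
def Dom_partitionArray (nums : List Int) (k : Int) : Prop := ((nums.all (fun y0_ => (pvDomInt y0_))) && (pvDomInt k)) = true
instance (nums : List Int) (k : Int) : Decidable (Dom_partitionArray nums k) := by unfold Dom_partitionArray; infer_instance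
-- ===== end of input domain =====

-- B replaces A's element-by-element greedy scan of the sorted array by a boundary-jumping
-- loop using bisect_right (an alternative decomposition of the same greedy partition).
-- Both A and B sort `nums` in place; the equivalence proved here is about the return value.

-- ===== PORT A =====
-- one loop step of A: state (res, l, r); indices l, r are provably < len(s) whenever Python
-- reads nums[r]/nums[l] (r = i on entry to iteration i), so getD's default 0 is never used
def pvStepA (s : List Int) (k : Int) (st : Int × Nat × Nat) (i : Nat) : Int × Nat × Nat :=
  if s.getD st.2.2 0 - s.getD st.2.1 0 ≤ k then (st.1, st.2.1, st.2.2 + 1)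
  else (st.1 + 1, i, i + 1)

def partitionArray (nums : List Int) (k : Int) : Int :=
  let s := PySem.List.sorted nums (fun x => x) false
  ((List.range s.length).foldl (pvStepA s k) (1, 0, 0)).1

-- ===== PORT B =====
-- B's while loop: res += 1; i = max(i + 1, bisect_right(nums, nums[i] + k))
def pvAltLoop (s : List Int) (k : Int) (i : Nat) (res : Int) : Int :=
  if h : i < s.length then
    pvAltLoop s k (Nat.max (i + 1) (PySem.List.bisectRight s (s.getD i 0 + k))) (res + 1)
  else res
termination_by s.length - i
decreasing_by
  have hle : i + 1 ≤ Nat.max (i + 1) (PySem.List.bisectRight s (s.getD i 0 + k)) :=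
    Nat.le_max_left _ _
  omega

def partitionArray_alt (nums : List Int) (k : Int) : Int :=
  let s := PySem.List.sorted nums (fun x => x) false
  pvAltLoop s k 0 0

-- ===== PRECONDITION & SPEC =====
-- Pre_ restricts to the problem's natural domain k ≥ 0: for k < 0 no group can satisfy
-- max - min ≤ k, so the question has no answer; there A happens to return len(nums)+1
-- (an artefact of its scan) while B returns len(nums).
def Pre_partitionArray (nums : List Int) (k : Int) : Prop := 0 ≤ k
instance (nums : List Int) (k : Int) : Decidable (Pre_partitionArray nums k) := by unfold Pre_partitionArray; infer_instance
def pvWitness_partitionArray : List Int × Int := ([0, 5, 3], 2)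

-- On the empty list A returns 1 (its res = 1 initialisation) while B returns 0; 0 partitions
-- is the intended count for an empty array.
def D_partitionArray (nums : List Int) (k : Int) : Prop := nums = []
instance (nums : List Int) (k : Int) : Decidable (D_partitionArray nums k) := by unfold D_partitionArray; infer_instance

def Spec_partitionArray (nums : List Int) (k : Int) (out : Int) : Prop := ¬ D_partitionArray nums k → out = partitionArray_alt nums k
instance (nums : List Int) (k : Int) (out : Int) : Decidable (Spec_partitionArray nums k out) := by unfold Spec_partitionArray; infer_instance

def pvDiffWitness_partitionArray : List Int × Int := ([], 0)
def pvDiffWitnessOut_partitionArray : Int × Int := (1, 0)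

-- ===== CLAIM (what is proved, stated in full; the proofs are below) =====
def Claim_unchanged_partitionArray : Prop := ∀ (nums : List Int) (k : Int), Dom_partitionArray nums k → Pre_partitionArray nums k → Spec_partitionArray nums k (partitionArray nums k)
def Claim_changed_partitionArray : Prop := Dom_partitionArray (pvDiffWitness_partitionArray.1) (pvDiffWitness_partitionArray.2) ∧ Pre_partitionArray (pvDiffWitness_partitionArray.1) (pvDiffWitness_partitionArray.2) ∧ D_partitionArray (pvDiffWitness_partitionArray.1) (pvDiffWitness_partitionArray.2) ∧ partitionArray (pvDiffWitness_partitionArray.1) (pvDiffWitness_partitionArray.2) = pvDiffWitnessOut_partitionArray.1 ∧ partitionArray_alt (pvDiffWitness_partitionArray.1) (pvDiffWitness_partitionArray.2) = pvDiffWitnessOut_partitionArray.2 ∧ pvDiffWitnessOut_partitionArray.1 ≠ pvDiffWitnessOut_partitionArray.2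
def Claim_exact_partitionArray : Prop := ∀ (nums : List Int) (k : Int), Dom_partitionArray nums k → Pre_partitionArray nums k → D_partitionArray nums k → partitionArray nums k ≠ partitionArray_alt nums k

-- ===== LEMMAS AND PROOFS =====

-- A's scan, as a pure recursion over the sorted list: from group start l, next index i.
def pvCntA (s : List Int) (k : Int) (l i : Nat) : Int :=
  if _h : i < s.length then
    if s.getD i 0 - s.getD l 0 ≤ k then pvCntA s k l (i + 1) else 1 + pvCntA s k i (i + 1)
  else 0
termination_by s.length - i

-- the next boundary B jumps to from group start l
def pvNext (s : List Int) (k : Int) (l : Nat) : Nat :=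
  Nat.max (l + 1) (PySem.List.bisectRight s (s.getD l 0 + k))

theorem pvStepA_eq (s : List Int) (k res : Int) (l i j : Nat) :
    pvStepA s k (res, l, i) j =
      (if s.getD i 0 - s.getD l 0 ≤ k then (res, l, i + 1) else (res + 1, j, j + 1)) := rfl

theorem pvFoldA (s : List Int) (k : Int) :
    ∀ (m i : Nat) (l : Nat) (res : Int), i + m = s.length →
      ((List.range' i m).foldl (pvStepA s k) (res, l, i)).1 = res + pvCntA s k l i := by
  intro m
  induction m with
  | zero =>
      intro i l res h
      rw [pvCntA.eq_def]
      simp [show ¬ i < s.length by omega]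
  | succ m ih =>
      intro i l res h
      have hi : i < s.length := by omega
      rw [List.range'_succ]
      simp only [List.foldl_cons]
      rw [pvCntA.eq_def]
      rw [dif_pos hi]
      rw [pvStepA_eq]
      by_cases hc : s.getD i 0 - s.getD l 0 ≤ k
      · rw [if_pos hc, if_pos hc, ih (i + 1) l res (by omega)]
      · rw [if_neg hc, if_neg hc, ih (i + 1) i (res + 1) (by omega)]
        ring

theorem pvNext_le (s : List Int) (k : Int) (l : Nat)
    (hs : s.Pairwise (· ≤ ·)) (hl : l < s.length) : pvNext s k l ≤ s.length := by
  have hb := (PySem.List.bisectRight_spec s (s.getD l 0 + k) hs).1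
  exact Nat.max_le.mpr ⟨by omega, hb⟩

-- at the boundary pvNext, A's scan closes the current group (or the list ends there)
theorem pvTerm (s : List Int) (k : Int) (hs : s.Pairwise (· ≤ ·)) (l : Nat) :
    pvCntA s k l (pvNext s k l) =
      (if pvNext s k l < s.length then 1 + pvCntA s k (pvNext s k l) (pvNext s k l + 1) else 0) := by
  by_cases hn : pvNext s k l < s.length
  · have hspec := PySem.List.bisectRight_spec s (s.getD l 0 + k) hs
    have hble : PySem.List.bisectRight s (s.getD l 0 + k) ≤ pvNext s k l := Nat.le_max_right _ _
    have hgt : s.getD l 0 + k < s[pvNext s k l] := hspec.2.2 _ hn hble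
    rw [pvCntA.eq_def]
    rw [dif_pos hn, if_neg (by rw [List.getD_eq_getElem s 0 hn]; omega), if_pos hn]
  · rw [pvCntA.eq_def, dif_neg hn, if_neg hn]

-- scanning from any i between l+1 and the boundary: A's scan walks to the boundary
theorem pvScan (s : List Int) (k : Int) (hs : s.Pairwise (· ≤ ·)) :
    ∀ (d l i : Nat), pvNext s k l - i ≤ d → l < s.length → l < i → i ≤ pvNext s k l →
      pvCntA s k l i =
        (if pvNext s k l < s.length then 1 + pvCntA s k (pvNext s k l) (pvNext s k l + 1) else 0) := by
  intro d
  induction d with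
  | zero =>
      intro l i hd hl hli hij
      have hieq : i = pvNext s k l := by omega
      rw [hieq]
      exact pvTerm s k hs l
  | succ d ih =>
      intro l i hd hl hli hij
      by_cases hieq : i = pvNext s k l
      · rw [hieq]
        exact pvTerm s k hs l
      · have hilt : i < pvNext s k l := by omega
        have hnle := pvNext_le s k l hs hl
        have hin : i < s.length := by omega
        -- i lies strictly below bisect_right's return, so s[i] ≤ s[l] + k
        have hib : i < PySem.List.bisectRight s (s.getD l 0 + k) := by
          by_contra hcon
          have hbi : PySem.List.bisectRight s (s.getD l 0 + k) ≤ i := by omega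
          have : pvNext s k l ≤ i := Nat.max_le.mpr ⟨by omega, hbi⟩
          omega
        have hle : s[i] ≤ s.getD l 0 + k :=
          (PySem.List.bisectRight_spec s (s.getD l 0 + k) hs).2.1 i hin hib
        rw [pvCntA.eq_def]
        rw [dif_pos hin, if_pos (by rw [List.getD_eq_getElem s 0 hin]; omega)]
        exact ih l (i + 1) (by omega) hl (by omega) (by omega)

-- B's loop from a group start = one group + A's scan from the next index
theorem pvAltEq (s : List Int) (k : Int) (hs : s.Pairwise (· ≤ ·)) :
    ∀ (d l : Nat) (res : Int), s.length - l ≤ d → l < s.length →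
      pvAltLoop s k l res = res + (1 + pvCntA s k l (l + 1)) := by
  intro d
  induction d with
  | zero => intro l res hd hl; omega
  | succ d ih =>
      intro l res hd hl
      have hnle := pvNext_le s k l hs hl
      have hgt : l + 1 ≤ pvNext s k l := Nat.le_max_left _ _
      have hscan := pvScan s k hs (pvNext s k l - (l + 1)) l (l + 1) (by omega) hl (by omega) hgt
      rw [pvAltLoop.eq_def, dif_pos hl]
      show pvAltLoop s k (pvNext s k l) (res + 1) = _
      by_cases hn : pvNext s k l < s.length
      · rw [ih (pvNext s k l) (res + 1) (by omega) hn]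
        rw [hscan, if_pos hn]
        ring
      · rw [pvAltLoop.eq_def, dif_neg hn, hscan, if_neg hn]
        ring

-- ===== VERDICT (by name: the statement is the Claim_ definition above) =====
theorem partitionArray_spec : Claim_unchanged_partitionArray := by
  intro nums k _hdom hk hD
  simp only [Pre_partitionArray] at hk
  simp only [D_partitionArray] at hD
  unfold partitionArray partitionArray_alt
  set s := PySem.List.sorted nums (fun x => x) false with hsdef
  have hlen : s.length = nums.length := PySem.List.length_sorted nums (fun x => x) false
  have hpos : 0 < s.length := by
    rw [hlen]; exact List.length_pos_iff.mpr hD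
  have hs : s.Pairwise (· ≤ ·) := PySem.List.sorted_pairwise nums (fun x => x)
  -- A's value
  have hA : ((List.range s.length).foldl (pvStepA s k) (1, 0, 0)).1 = 1 + pvCntA s k 0 0 := by
    rw [List.range_eq_range']
    exact pvFoldA s k s.length 0 0 1 (by omega)
  -- A's first iteration: nums[0] - nums[0] = 0 ≤ k, this is where 0 ≤ k is used
  have h00 : pvCntA s k 0 0 = pvCntA s k 0 1 := by
    rw [pvCntA.eq_def, dif_pos hpos, if_pos (by omega)]
  -- B's value
  have hB : pvAltLoop s k 0 0 = 0 + (1 + pvCntA s k 0 1) :=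
    pvAltEq s k hs s.length 0 0 (by omega) hpos
  simp only [hA, h00, hB]
  ring

theorem partitionArray_changed : Claim_changed_partitionArray := by
  unfold Claim_changed_partitionArray
  refine ⟨by decide, by decide, by decide, by decide, ?_, by decide⟩
  show pvAltLoop (PySem.List.sorted [] (fun x => x) false) 0 0 0 = 0
  rw [pvAltLoop.eq_def]
  simp

theorem partitionArray_tight : Claim_exact_partitionArray := by
  intro nums k _hdom _hk hD
  unfold D_partitionArray at hD
  subst hD
  have hA : partitionArray [] k = 1 := rfl
  have hB : partitionArray_alt [] k = 0 := by
    show pvAltLoop (PySem.List.sorted [] (fun x => x) false) k 0 0 = 0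
    rw [pvAltLoop.eq_def]
    simp
  omega
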